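-- pv_equiv track=rewrite | github.com/schoi828/DCL | model/modules.py | dim_list
-- ===== SOURCE A (Python) =====
-- def dim_list(start, end):
--
--   l = []
--   while start <= end:
--     l.append(start)
--     if start >= 512:
--       start+=256
--     else:
--       start*=2
--   return l
-- ===== SOURCE B (Python) =====
-- def dim_list(start, end):
--     # Closed form: no loop over the produced elements. Compute the length k of
--     # the doubling (geometric) prefix via bit_length, and the length n of the
--     # +256 arithmetic tail via integer division, then build both parts directly.
--     cap = min(511, end)
--     k = (cap // start).bit_length() if cap >= start else 0
--     s = start << k
--     n = (end - s) // 256 + 1 if s <= end else 0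
--     return [start << i for i in range(k)] + [s + 256 * i for i in range(n)]
-- ===== Notes on version B (the rewrite author's own statement) =====
-- stated objective: alternative
-- what changed: B replaces A's element-by-element branching while-loop with a closed form: it computes the length of the doubling prefix via bit_length and the length of the +256 arithmetic tail via integer division, then materialises both parts directly with comprehensions.
import Mathlib
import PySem

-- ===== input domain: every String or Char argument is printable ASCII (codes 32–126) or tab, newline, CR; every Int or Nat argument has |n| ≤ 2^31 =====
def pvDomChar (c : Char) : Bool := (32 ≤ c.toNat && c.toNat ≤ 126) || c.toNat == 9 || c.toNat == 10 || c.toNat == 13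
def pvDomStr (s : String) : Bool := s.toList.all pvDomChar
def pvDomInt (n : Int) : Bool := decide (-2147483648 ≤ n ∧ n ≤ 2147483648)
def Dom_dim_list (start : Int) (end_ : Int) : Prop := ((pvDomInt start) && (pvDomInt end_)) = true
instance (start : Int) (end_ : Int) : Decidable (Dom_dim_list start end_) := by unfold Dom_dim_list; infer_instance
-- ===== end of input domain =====

-- B computes the list in closed form (bit_length for the doubling-prefix length, integer division for the +256 tail length) instead of A's element-by-element branching loop.


-- ===== PORT A =====
-- A's while-loop; the extra `1 ≤ start` in the guard is a totality guard only:
-- Python A diverges whenever start ≤ 0 ∧ start ≤ end (excluded by Pre_).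
def dim_list (start : Int) (end_ : Int) : List Int :=
  if h : 1 ≤ start ∧ start ≤ end_ then
    start :: (if start ≥ 512 then dim_list (start + 256) end_ else dim_list (2 * start) end_)
  else []
termination_by (end_ + 1 - start).toNat
decreasing_by
  · omega
  · omega

-- ===== PORT B =====
-- closed form, step for step from Source B:
--   cap = min(511, end); k = (cap // start).bit_length() if cap >= start else 0
--   s = start << k; n = (end - s)//256 + 1 if s <= end else 0
--   [start << i for i in range(k)] + [s + 256*i for i in range(n)]
-- (`x << i` is ported as `x * 2 ^ i`, exact for Python ints)
def dimAltK (start : Int) (end_ : Int) : Nat :=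
  if start ≤ min 511 end_ then PySem.Int.bitLength (PySem.Int.floordiv (min 511 end_) start) else 0

def dimAltTail (s : Int) (end_ : Int) : List Int :=
  (List.range (if s ≤ end_ then (PySem.Int.floordiv (end_ - s) 256 + 1).toNat else 0)).map
    (fun i : Nat => s + 256 * (i : Int))

def dim_list_alt (start : Int) (end_ : Int) : List Int :=
  (List.range (dimAltK start end_)).map (fun i => start * 2 ^ i)
    ++ dimAltTail (start * 2 ^ dimAltK start end_) end_

-- ===== PRECONDITION & SPEC =====
-- Pre_ excludes exactly the inputs (start ≤ 0 and start ≤ end) on which Python A loops forever.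
def Pre_dim_list (start : Int) (end_ : Int) : Prop := 1 ≤ start ∨ end_ < start
instance (start : Int) (end_ : Int) : Decidable (Pre_dim_list start end_) := by unfold Pre_dim_list; infer_instance
def pvWitness_dim_list : Int × Int := (1, 1000)

def Spec_dim_list (start : Int) (end_ : Int) (out : List Int) : Prop := out = dim_list_alt start end_
instance (start : Int) (end_ : Int) (out : List Int) : Decidable (Spec_dim_list start end_ out) := by unfold Spec_dim_list; infer_instance

-- ===== CLAIM =====
def Claim_equal_dim_list : Prop := ∀ (start : Int) (end_ : Int), Dom_dim_list start end_ → Pre_dim_list start end_ → Spec_dim_list start end_ (dim_list start end_)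

-- ===== LEMMAS AND PROOFS =====

-- B returns [] when the range is empty.
theorem alt_nil (start end_ : Int) (h : end_ < start) : dim_list_alt start end_ = [] := by
  unfold dim_list_alt dimAltK dimAltTail
  rw [if_neg (by omega : ¬ start ≤ min 511 end_)]
  simp only [pow_zero, mul_one, List.range_zero, List.map_nil, List.nil_append]
  rw [if_neg (by omega : ¬ start ≤ end_)]
  simp

-- the arithmetic tail unfolds one +256 step
theorem tail_step (s end_ : Int) (h : s ≤ end_) :
    dimAltTail s end_ = s :: dimAltTail (s + 256) end_ := by
  unfold dimAltTail
  rw [if_pos h, PySem.Int.floordiv_eq_ediv_of_pos (by norm_num : (0:Int) < 256)]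
  by_cases h2 : s + 256 ≤ end_
  · rw [if_pos h2, PySem.Int.floordiv_eq_ediv_of_pos (by norm_num : (0:Int) < 256)]
    have hn : ((end_ - s) / 256 + 1).toNat
        = ((end_ - (s + 256)) / 256 + 1).toNat + 1 := by omega
    rw [hn, List.range_succ_eq_map]
    simp only [List.map_cons, List.map_map, Nat.cast_zero, mul_zero, add_zero]
    congr 1
    apply List.map_congr_left
    intro i _
    simp only [Function.comp_apply]
    push_cast
    ring
  · rw [if_neg h2]
    have hn : ((end_ - s) / 256 + 1).toNat = 1 := by omega
    rw [hn]
    simp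

-- B satisfies A's ≥512 (+256) unfolding step.
theorem alt_big (start end_ : Int) (h : 512 ≤ start) (hle : start ≤ end_) :
    dim_list_alt start end_ = start :: dim_list_alt (start + 256) end_ := by
  unfold dim_list_alt dimAltK
  rw [if_neg (by omega : ¬ start ≤ min 511 end_),
      if_neg (by omega : ¬ start + 256 ≤ min 511 end_)]
  simp only [pow_zero, mul_one, List.range_zero, List.map_nil, List.nil_append]
  exact tail_step start end_ hle

-- B satisfies A's <512 (doubling) unfolding step.
theorem alt_small (start end_ : Int) (h1 : 1 ≤ start) (h2 : start < 512) (hle : start ≤ end_) :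
    dim_list_alt start end_ = start :: dim_list_alt (2 * start) end_ := by
  unfold dim_list_alt dimAltK
  have hcap : start ≤ min 511 end_ := by omega
  rw [if_pos hcap]
  by_cases hc : 2 * start ≤ min 511 end_
  · -- q ≥ 2 : bitLength q = bitLength (q/2) + 1 and q/2 = cap // (2*start)
    rw [if_pos hc]
    have hq2 : (2:Int) ≤ PySem.Int.floordiv (min 511 end_) start := by
      rw [PySem.Int.le_floordiv_iff_mul_le (by omega)]; omega
    have hbl := PySem.Int.bitLength_of_pos
      (n := PySem.Int.floordiv (min 511 end_) start) (by omega)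
    have hdd : PySem.Int.floordiv (PySem.Int.floordiv (min 511 end_) start) 2
        = PySem.Int.floordiv (min 511 end_) (2 * start) := by
      rw [PySem.Int.floordiv_eq_ediv_of_pos (by omega : (0:Int) < start),
          PySem.Int.floordiv_eq_ediv_of_pos (by norm_num : (0:Int) < 2),
          PySem.Int.floordiv_eq_ediv_of_pos (by omega : (0:Int) < 2 * start),
          mul_comm (2:Int) start, Int.ediv_ediv_of_nonneg (by omega)]
    rw [hdd] at hbl
    rw [hbl]
    have hs : start * 2 ^ (PySem.Int.bitLength (PySem.Int.floordiv (min 511 end_) (2 * start)) + 1)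
        = 2 * start * 2 ^ PySem.Int.bitLength (PySem.Int.floordiv (min 511 end_) (2 * start)) := by
      rw [pow_succ]; ring
    rw [hs, List.range_succ_eq_map]
    simp only [List.map_cons, List.map_map, pow_zero, mul_one, List.cons_append]
    congr 2
    apply List.map_congr_left
    intro i _
    simp only [Function.comp_apply]
    rw [pow_succ]; ring
  · -- q = 1 : the doubling prefix is exactly [start]
    rw [if_neg hc]
    have hq1 : PySem.Int.floordiv (min 511 end_) start = 1 := by
      rw [PySem.Int.floordiv_eq_iff_of_pos (by omega)]; omega
    rw [hq1]
    have hb1 : PySem.Int.bitLength 1 = 1 := by decide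
    rw [hb1]
    simp only [pow_one, pow_zero, mul_one, List.range_one, List.map_cons, List.map_nil,
      List.cons_append, List.nil_append, List.range_zero]
    rw [mul_comm]

-- A equals B on Pre_.
theorem dim_list_eq_alt (start end_ : Int) (h : Pre_dim_list start end_) :
    dim_list start end_ = dim_list_alt start end_ := by
  rw [dim_list.eq_def]
  by_cases hg : 1 ≤ start ∧ start ≤ end_
  · rw [dif_pos hg]
    by_cases h512 : start ≥ 512
    · rw [if_pos h512, alt_big start end_ (by omega) hg.2,
        dim_list_eq_alt (start + 256) end_ (Or.inl (by omega))]
    · rw [if_neg h512, alt_small start end_ hg.1 (by omega) hg.2,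
        dim_list_eq_alt (2 * start) end_ (Or.inl (by omega))]
  · rw [dif_neg hg, alt_nil start end_ (by unfold Pre_dim_list at h; omega)]
termination_by (end_ + 1 - start).toNat
decreasing_by
  · omega
  · omega

-- ===== VERDICT =====
theorem dim_list_spec : Claim_equal_dim_list := by
  intro start end_ _ hpre
  exact dim_list_eq_alt start end_ hpre
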